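-- pv_equiv track=rewrite | github.com/callmetan7/Project-Ouroborus | lexer.py | findValInQuote
-- ===== SOURCE A (Python) =====
-- def createCharList(line):
--     charList = []
--     for word in line:
--         for char in word:
--             charList.append(char)
--     return charList
--
-- def findValInQuote(line):
--     charList = createCharList(line)
--     inQuotes = False
--     quoteCounter = 0
--     tempStr = ''
--     for charIndex, char in enumerate(charList):
--         if char == '(' or char == ')':
--             inQuotes = True
--             quoteCounter += 1
--             if quoteCounter % 2 == 0:
--                 inQuotes = False
--         if inQuotes:
--             tempStr += char
--     return tempStr
-- ===== SOURCE B (Python) =====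
-- def _outside(cs):
--     # discard everything up to the first paren; finished if there is none
--     i = 0
--     while i < len(cs) and cs[i] not in '()':
--         i += 1
--     if i == len(cs):
--         return []
--     return _inside(cs[i], cs[i + 1:])
--
-- def _inside(p, cs):
--     # keep the opening paren and the chars up to the next paren, which is dropped
--     j = 0
--     while j < len(cs) and cs[j] not in '()':
--         j += 1
--     return [p] + cs[:j] + _outside(cs[j + 1:])
--
-- def findValInQuote(line):
--     chars = [c for word in line for c in word]
--     return ''.join(_outside(chars))
-- ===== Notes on version B (the rewrite author's own statement) =====
-- stated objective: alternative
-- what changed: A makes one pass with an inQuotes flag and a paren counter whose parity toggles collection char by char; B instead recursively splits the flattened text into paren-delimited segments (skip to the next paren, keep it and everything up to the following paren which is dropped, recurse), with no flag or counter.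
import Mathlib
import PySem

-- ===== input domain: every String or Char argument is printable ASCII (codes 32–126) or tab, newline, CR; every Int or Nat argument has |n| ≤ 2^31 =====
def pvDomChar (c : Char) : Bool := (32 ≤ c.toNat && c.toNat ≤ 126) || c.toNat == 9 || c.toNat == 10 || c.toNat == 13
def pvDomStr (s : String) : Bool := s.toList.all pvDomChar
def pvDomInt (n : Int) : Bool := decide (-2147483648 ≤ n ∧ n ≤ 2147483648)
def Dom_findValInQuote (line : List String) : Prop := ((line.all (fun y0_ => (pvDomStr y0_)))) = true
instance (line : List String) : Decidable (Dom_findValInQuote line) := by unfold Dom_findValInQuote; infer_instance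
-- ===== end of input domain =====

-- B replaces A's boolean-toggle/counter single pass by a mutually recursive skip/keep
-- decomposition over paren-delimited segments (objective: alternative; same return value).


-- ===== PORT A =====
def createCharList (line : List String) : List Char :=
  line.foldl (fun charList word => word.toList.foldl (fun cl c => cl ++ [c]) charList) []

-- one iteration of A's loop: state (inQuotes, quoteCounter, tempStr), input (charIndex, char)
def stepA (st : Bool × Int × List Char) (p : Int × Char) : Bool × Int × List Char :=
  let char := p.2
  let (inQuotes, quoteCounter, tempStr) := st
  let (inQuotes, quoteCounter) :=
    if char = '(' ∨ char = ')' then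
      let q := quoteCounter + 1
      (if q % 2 = 0 then false else true, q)
    else (inQuotes, quoteCounter)
  (inQuotes, quoteCounter, if inQuotes then tempStr ++ [char] else tempStr)

def findValInQuote (line : List String) : String :=
  let charList := createCharList line
  let st := (PySem.List.enumerate charList).foldl stepA (false, 0, [])
  String.ofList st.2.2

-- ===== PORT B =====
def isParen (c : Char) : Bool := c = '(' || c = ')'

mutual
-- discard everything up to the first paren; finished if there is none
def bOutside (cs : List Char) : List Char :=
  match h : cs.dropWhile (fun c => !isParen c) with
  | [] => []
  | p :: rest => bInside p rest
termination_by 2 * cs.length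
decreasing_by
  have h1 : (cs.dropWhile (fun c => !isParen c)).length ≤ cs.length :=
    cs.length_dropWhile_le _
  simp [h] at h1; omega

-- keep the opening paren and the chars up to the next paren, which is dropped
def bInside (p : Char) (cs : List Char) : List Char :=
  p :: cs.takeWhile (fun c => !isParen c)
    ++ bOutside ((cs.dropWhile (fun c => !isParen c)).drop 1)
termination_by 2 * cs.length + 1
decreasing_by
  have h1 : (cs.dropWhile (fun c => !isParen c)).length ≤ cs.length :=
    cs.length_dropWhile_le _
  simp; omega
end

def findValInQuote_alt (line : List String) : String :=
  let chars := (line.map String.toList).flatten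
  String.ofList (bOutside chars)

-- ===== PRECONDITION & SPEC =====
def Spec_findValInQuote (line : List String) (out : String) : Prop := out = findValInQuote_alt line
instance (line : List String) (out : String) : Decidable (Spec_findValInQuote line out) := by unfold Spec_findValInQuote; infer_instance

-- ===== CLAIM (what is proved, stated in full; the proofs are below) =====
def Claim_equal_findValInQuote : Prop := ∀ (line : List String), Dom_findValInQuote line → Spec_findValInQuote line (findValInQuote line)

-- ===== LEMMAS AND PROOFS =====

-- what a "kept" (inQuotes) section contributes, after its opening paren
def bIn (cs : List Char) : List Char :=
  cs.takeWhile (fun c => !isParen c)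
    ++ bOutside ((cs.dropWhile (fun c => !isParen c)).drop 1)

theorem bOutside_eq (cs : List Char) :
    bOutside cs = match cs.dropWhile (fun c => !isParen c) with
      | [] => [] | p :: rest => p :: bIn rest := by
  rw [bOutside]
  split
  · rename_i h; rw [h]
  · rename_i p rest h; rw [h, bInside]; simp [bIn]

theorem bOutside_nil : bOutside [] = [] := by
  simp [bOutside_eq]

theorem bOutside_cons_paren (c : Char) (cs : List Char) (h : isParen c = true) :
    bOutside (c :: cs) = c :: bIn cs := by
  simp [bOutside_eq, h]

theorem bOutside_cons_nonparen (c : Char) (cs : List Char) (h : isParen c = false) :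
    bOutside (c :: cs) = bOutside cs := by
  simp [bOutside_eq, h]

theorem paren_iff (c : Char) : (c = '(' ∨ c = ')') ↔ isParen c = true := by
  simp [isParen]

-- A's enumerate fold collapsed: inQuotes is tied to the counter's parity, and the
-- accumulated chars are acc followed by B's bIn / bOutside of the remaining chars
theorem foldA_eq (cs : List Char) : ∀ (n q : Int) (acc : List Char)
    (b : Bool), b = decide (q % 2 ≠ 0) →
    ((PySem.List.enumerate cs n).foldl stepA (b, q, acc)).2.2
      = acc ++ (if b then bIn cs else bOutside cs) := by
  induction cs with
  | nil => intro n q acc b hb; simp [PySem.List.enumerate, bOutside_nil, bIn, bOutside_nil]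
  | cons c cs ih =>
    intro n q acc b hb
    rw [show PySem.List.enumerate (c :: cs) n = (n, c) :: PySem.List.enumerate cs (n+1)
        from by simp [PySem.List.enumerate]]
    by_cases hp : isParen c = true
    · have hor : c = '(' ∨ c = ')' := (paren_iff c).mpr hp
      simp only [List.foldl_cons, stepA, hor, if_true]
      cases b with
      | false =>
        have hq1 : ¬ ((q + 1) % 2 = 0) := by simp at hb; omega
        simp only [if_neg hq1, if_true]
        rw [ih (n+1) (q+1) (acc ++ [c]) true (by simp; omega)]
        simp [bOutside_cons_paren c cs hp]
      | true =>
        have hq1 : (q + 1) % 2 = 0 := by simp at hb; omega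
        simp only [if_pos hq1, reduceIte]
        simp only [Bool.false_eq_true, if_false]
        rw [ih (n+1) (q+1) acc false (by simp [hq1])]
        simp [bIn, hp]
    · have hor : ¬ (c = '(' ∨ c = ')') := fun h => hp ((paren_iff c).mp h)
      simp only [List.foldl_cons, stepA, hor, if_false]
      cases b with
      | false =>
        simp only [Bool.false_eq_true, if_false]
        rw [ih (n+1) q acc false hb]
        simp [bOutside_cons_nonparen c cs (by simpa using hp)]
      | true =>
        simp only [if_true]
        rw [ih (n+1) q (acc ++ [c]) true hb]
        simp [bIn, hp]

theorem createCharList_eq (line : List String) :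
    createCharList line = (line.map String.toList).flatten := by
  unfold createCharList
  have inner : ∀ (w : List Char) (a : List Char),
      w.foldl (fun cl c => cl ++ [c]) a = a ++ w := by
    intro w
    induction w with
    | nil => simp
    | cons c cs ihw => intro a; simp [ihw]
  have outer : ∀ (ws : List String) (a : List Char),
      ws.foldl (fun charList word =>
        word.toList.foldl (fun cl c => cl ++ [c]) charList) a
      = a ++ (ws.map String.toList).flatten := by
    intro ws
    induction ws with
    | nil => simp
    | cons v vs ihv => intro a; simp [List.foldl_cons, inner]
  simpa using outer line []

-- ===== VERDICT (by name: the statement is the Claim_ definition above) =====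
theorem findValInQuote_spec : Claim_equal_findValInQuote := by
  intro line _
  unfold Spec_findValInQuote
  dsimp only [findValInQuote, findValInQuote_alt]
  rw [foldA_eq (createCharList line) 0 0 [] false (by simp)]
  simp [createCharList_eq]
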